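-- pv_equiv track=rewrite | github.com/23adrian2300/WDI-AGH | Zestaw 4/zestaw 4.py | podciag
-- ===== SOURCE A (Python) =====
-- def podciag(t):
--     n = len(t)
--     s_max = 0
--     for i in range(n):
--         for j in range(n):
--             suma_w = suma_k = t[i][j]
--             for k in range(1, 10):
--                 s_max = max(suma_w, suma_k, s_max)
--                 if k + i >= n and k + j >= n:
--                     break
--                 elif k + j >= n:
--                     suma_k += t[i + k][j]
--                 elif k + i >= n:
--                     suma_w += t[i][j + k]
--                 else:
--                     suma_w += t[i][j + k]
--                     suma_k += t[i + k][j]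
--
--     return s_max
-- ===== SOURCE B (Python) =====
-- def podciag(t):
--     # prefix-sum re-implementation: treat the n rows and n columns of the
--     # top-left n x n square uniformly as "lines", scan each once with a
--     # running prefix list, and take the best segment of length 1..9.
--     n = len(t)
--     lines = [t[i][:n] for i in range(n)]
--     lines += [[t[i][j] for i in range(n)] for j in range(n)]
--     best = 0
--     for line in lines:
--         P = [0]
--         s = 0
--         for x in line:
--             s += x
--             P.append(s)
--         m = len(line)
--         for a in range(m):
--             for L in range(1, min(9, m - a) + 1):
--                 v = P[a + L] - P[a]
--                 if v > best:
--                     best = v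
--     return best
-- ===== Notes on version B (the rewrite author's own statement) =====
-- stated objective: alternative
-- what changed: Replaces A's per-cell inner loop that grows a row sum and a column sum simultaneously with a running break/saturation state by a uniform pass over the 2n row/column lines, each scanned once via a prefix-sum list from which every length-1..9 segment sum is read off as a difference.
-- outside the precondition, e.g. on podciag([[1, 2], [3]]): A raises IndexError, B raises IndexError
import Mathlib
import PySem

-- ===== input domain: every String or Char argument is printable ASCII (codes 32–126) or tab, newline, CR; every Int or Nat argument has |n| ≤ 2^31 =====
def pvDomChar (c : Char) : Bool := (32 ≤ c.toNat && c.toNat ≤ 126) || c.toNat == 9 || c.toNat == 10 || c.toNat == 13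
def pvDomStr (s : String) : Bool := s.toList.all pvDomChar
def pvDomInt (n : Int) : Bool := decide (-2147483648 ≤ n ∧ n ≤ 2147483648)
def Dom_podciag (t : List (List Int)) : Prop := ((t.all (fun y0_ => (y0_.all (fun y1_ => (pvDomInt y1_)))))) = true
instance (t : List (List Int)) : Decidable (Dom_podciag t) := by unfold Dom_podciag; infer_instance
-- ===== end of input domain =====

-- B is a prefix-sum re-implementation (rows and columns handled uniformly as "lines");
-- equal to A's triple nested loop on every square-enough grid (Pre_).

-- t[i][j]; Pre_ guarantees the indices are in range, so the default is never used
def pvEl (t : List (List Int)) (i j : Nat) : Int := (t.getD i []).getD j 0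

-- ===== PORT A =====
-- the 'for k in range(1, 10)' loop of A, with its break and in-place updates
def podciagInner (t : List (List Int)) (n i j k : Nat) (suma_w suma_k s_max : Int) : Int :=
  if 10 ≤ k then s_max
  else
    let s := max suma_w (max suma_k s_max)
    if k + i ≥ n ∧ k + j ≥ n then s
    else if k + j ≥ n then podciagInner t n i j (k+1) suma_w (suma_k + pvEl t (i+k) j) s
    else if k + i ≥ n then podciagInner t n i j (k+1) (suma_w + pvEl t i (j+k)) suma_k s
    else podciagInner t n i j (k+1) (suma_w + pvEl t i (j+k)) (suma_k + pvEl t (i+k) j) s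
termination_by 10 - k
decreasing_by all_goals omega

def podciag (t : List (List Int)) : Int :=
  let n := t.length
  (List.range n).foldl (fun s_max i =>
    (List.range n).foldl (fun s_max j =>
      podciagInner t n i j 1 (pvEl t i j) (pvEl t i j) s_max) s_max) 0

-- ===== PORT B =====
-- running prefix list: P = [0]; s = 0; for x in line: s += x; P.append(s)
def pvPrefixStep (ps : List Int × Int) (x : Int) : List Int × Int :=
  (ps.1 ++ [ps.2 + x], ps.2 + x)

def pvPrefixes (line : List Int) : List Int := (line.foldl pvPrefixStep ([0], 0)).1

-- for a in range(m): for L in range(1, min(9, m-a)+1): v = P[a+L]-P[a]; if v > best: best = v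
def pvScanLine (line : List Int) (best : Int) : Int :=
  let P := pvPrefixes line
  let m := line.length
  (List.range m).foldl (fun b a =>
    (List.range (min 9 (m - a))).foldl (fun b L' =>
      let v := P.getD (a + (L' + 1)) 0 - P.getD a 0
      if v > b then v else b) b) best

def podciag_alt (t : List (List Int)) : Int :=
  let n := t.length
  let lines := (List.range n).map (fun i => (t.getD i []).take n)
      ++ (List.range n).map (fun j => (List.range n).map (fun i => pvEl t i j))
  lines.foldl (fun best line => pvScanLine line best) 0

-- ===== PRECONDITION & SPEC =====
-- A reads t[i][j] for all i, j < len(t); it raises IndexError iff some row is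
-- shorter than len(t). Pre_ excludes exactly those ragged grids.
def Pre_podciag (t : List (List Int)) : Prop := ∀ row ∈ t, t.length ≤ row.length
instance (t : List (List Int)) : Decidable (Pre_podciag t) := by unfold Pre_podciag; infer_instance

def pvWitness_podciag : List (List Int) := [[1, -2], [3, 4]]

def Spec_podciag (t : List (List Int)) (out : Int) : Prop := out = podciag_alt t
instance (t : List (List Int)) (out : Int) : Decidable (Spec_podciag t out) := by unfold Spec_podciag; infer_instance

-- ===== CLAIM (what is proved, stated in full; the proofs are below) =====
def Claim_equal_podciag : Prop := ∀ (t : List (List Int)), Dom_podciag t → Pre_podciag t → Spec_podciag t (podciag t)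

-- ===== LEMMAS AND PROOFS =====

-- fold of max, and the row/column segment sums both programs are maximising over
def supL (s : Int) (l : List Int) : Int := l.foldl max s

def srow (t : List (List Int)) (i j L : Nat) : Int :=
  ((List.range L).map (fun m => pvEl t i (j + m))).sum

def scol (t : List (List Int)) (i j L : Nat) : Int :=
  ((List.range L).map (fun m => pvEl t (i + m) j)).sum

-- the pair of sums A's inner loop holds at step k (lengths saturate at n-j / n-i)
def Fc (t : List (List Int)) (n i j k : Nat) : Int :=
  max (srow t i j (min k (n - j))) (scol t i j (min k (n - i)))

lemma le_supL (s : Int) (l : List Int) : s ≤ supL s l := by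
  induction l generalizing s with
  | nil => simp [supL]
  | cons x xs ih => exact le_trans (le_max_left s x) (ih (max s x))

lemma mem_le_supL {x : Int} {l : List Int} (s : Int) (h : x ∈ l) : x ≤ supL s l := by
  induction l generalizing s with
  | nil => cases h
  | cons y ys ih =>
    rcases List.mem_cons.mp h with rfl | h
    · exact le_trans (le_max_right s x) (le_supL _ _)
    · exact ih _ h

lemma supL_le {s b : Int} {l : List Int} (hs : s ≤ b) (h : ∀ x ∈ l, x ≤ b) :
    supL s l ≤ b := by
  induction l generalizing s with
  | nil => simpa [supL]
  | cons y ys ih =>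
    exact ih (max_le hs (h y (by simp))) (fun x hx => h x (by simp [hx]))

lemma supL_append (s : Int) (l1 l2 : List Int) :
    supL s (l1 ++ l2) = supL (supL s l1) l2 := by
  simp [supL, List.foldl_append]

lemma foldl_supL {α : Type} (l : List α) (g : α → List Int) (s : Int) :
    l.foldl (fun s a => supL s (g a)) s = supL s (l.flatMap g) := by
  induction l generalizing s with
  | nil => simp [supL]
  | cons a l ih => simp [List.flatMap_cons, supL_append, ih]

lemma supL_const {c : Int} : ∀ {l : List Int}, l ≠ [] → (∀ x ∈ l, x = c) →
    ∀ s : Int, supL s l = max s c := by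
  intro l
  induction l with
  | nil => intro hne; cases hne rfl
  | cons y ys ih =>
    intro _ h s
    have hy : y = c := h y (by simp)
    cases ys with
    | nil => simp [supL, hy]
    | cons z zs =>
      have h2 := ih (by simp) (fun x hx => h x (by simp [hx])) (max s y)
      show supL (max s y) (z :: zs) = max s c
      rw [h2, hy]
      omega

-- row/column sums extend one cell at a time
lemma srow_succ (t : List (List Int)) (i j L : Nat) :
    srow t i j (L + 1) = srow t i j L + pvEl t i (j + L) := by
  simp [srow, List.range_succ]

lemma scol_succ (t : List (List Int)) (i j L : Nat) :
    scol t i j (L + 1) = scol t i j L + pvEl t (i + L) j := by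
  simp [scol, List.range_succ]

-- A's inner loop computes the running max of the saturated segment pairs Fc
lemma supL_cons (s x : Int) (l : List Int) : supL s (x :: l) = supL (max s x) l := rfl

lemma innerA_eq (t : List (List Int)) (n i j : Nat) (hi : i < n) (hj : j < n) :
    ∀ fuel k s, 10 - k = fuel →
      podciagInner t n i j k (srow t i j (min k (n - j))) (scol t i j (min k (n - i))) s
        = supL s ((List.range' k fuel).map (Fc t n i j)) := by
  intro fuel
  induction fuel with
  | zero =>
    intro k s hk
    rw [podciagInner]
    simp [show (10:Nat) ≤ k by omega, supL]
  | succ fuel ih =>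
    intro k s hk
    have hrange : List.range' k (fuel + 1) = k :: List.range' (k + 1) fuel :=
      List.range'_succ
    rw [podciagInner]
    simp only [if_neg (show ¬ (10 ≤ k) by omega)]
    by_cases hb : n ≤ k + i ∧ n ≤ k + j
    · simp only [if_pos hb]
      have hall : ∀ x ∈ (List.range' k (fuel + 1)).map (Fc t n i j), x = Fc t n i j k := by
        intro x hx
        obtain ⟨k', hk', rfl⟩ := List.mem_map.mp hx
        have hk'' := List.mem_range'_1.mp hk'
        unfold Fc
        have e1 : min k' (n - j) = min k (n - j) := by omega
        have e2 : min k' (n - i) = min k (n - i) := by omega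
        rw [e1, e2]
      rw [supL_const (by simp [hrange]) hall s]
      unfold Fc
      omega
    · by_cases h2 : n ≤ k + j
      · simp only [if_neg hb, if_pos h2]
        have ec : scol t i j (min k (n - i)) + pvEl t (i + k) j
            = scol t i j (min (k + 1) (n - i)) := by
          rw [show min k (n - i) = k by omega, show min (k + 1) (n - i) = k + 1 by omega,
            scol_succ]
        have ew : srow t i j (min k (n - j)) = srow t i j (min (k + 1) (n - j)) := by
          rw [show min (k + 1) (n - j) = min k (n - j) by omega]
        have hih := ih (k + 1)
          (max (srow t i j (min k (n - j))) (max (scol t i j (min k (n - i))) s)) (by omega)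
        rw [← ew, ← ec] at hih
        rw [hih, hrange, List.map_cons, supL_cons]
        congr 1
        unfold Fc
        omega
      · by_cases h3 : n ≤ k + i
        · simp only [if_neg hb, if_neg h2, if_pos h3]
          have ew : srow t i j (min k (n - j)) + pvEl t i (j + k)
              = srow t i j (min (k + 1) (n - j)) := by
            rw [show min k (n - j) = k by omega, show min (k + 1) (n - j) = k + 1 by omega,
              srow_succ]
          have ec : scol t i j (min k (n - i)) = scol t i j (min (k + 1) (n - i)) := by
            rw [show min (k + 1) (n - i) = min k (n - i) by omega]
          have hih := ih (k + 1)
            (max (srow t i j (min k (n - j))) (max (scol t i j (min k (n - i))) s)) (by omega)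
          rw [← ew, ← ec] at hih
          rw [hih, hrange, List.map_cons, supL_cons]
          congr 1
          unfold Fc
          omega
        · simp only [if_neg hb, if_neg h2, if_neg h3]
          have ew : srow t i j (min k (n - j)) + pvEl t i (j + k)
              = srow t i j (min (k + 1) (n - j)) := by
            rw [show min k (n - j) = k by omega, show min (k + 1) (n - j) = k + 1 by omega,
              srow_succ]
          have ec : scol t i j (min k (n - i)) + pvEl t (i + k) j
              = scol t i j (min (k + 1) (n - i)) := by
            rw [show min k (n - i) = k by omega, show min (k + 1) (n - i) = k + 1 by omega,
              scol_succ]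
          have hih := ih (k + 1)
            (max (srow t i j (min k (n - j))) (max (scol t i j (min k (n - i))) s)) (by omega)
          rw [← ew, ← ec] at hih
          rw [hih, hrange, List.map_cons, supL_cons]
          congr 1
          unfold Fc
          omega

-- prefix list characterisation
lemma pref_aux : ∀ (l : List Int) (ps : List Int) (s : Int),
    l.foldl pvPrefixStep (ps, s)
      = (ps ++ (List.range l.length).map (fun a => s + (l.take (a + 1)).sum), s + l.sum) := by
  intro l
  induction l with
  | nil => intro ps s; simp
  | cons x xs ih =>
    intro ps s
    simp only [List.foldl_cons, pvPrefixStep, ih, List.length_cons, List.range_succ_eq_map,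
      List.map_cons, List.map_map, List.take_succ_cons, List.sum_cons, List.take_zero,
      List.sum_nil, List.sum_cons]
    rw [Prod.mk.injEq]
    constructor
    · simp [List.append_assoc, Function.comp, add_assoc]
    · ring

lemma prefixes_eq (line : List Int) :
    pvPrefixes line = (List.range (line.length + 1)).map (fun a => (line.take a).sum) := by
  simp only [pvPrefixes, pref_aux, List.range_succ_eq_map, List.map_cons, List.map_map]
  simp [Function.comp]

lemma prefixes_getD {line : List Int} {a : Nat} (h : a ≤ line.length) :
    (pvPrefixes line).getD a 0 = (line.take a).sum := by
  rw [prefixes_eq]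
  rw [List.getD_eq_getElem?_getD, List.getElem?_map, List.getElem?_range (by omega)]
  simp

lemma sum_take_succ {line : List Int} {k : Nat} (hk : k < line.length) :
    (line.take (k + 1)).sum = (line.take k).sum + line.getD k 0 := by
  rw [List.take_add_one, List.getElem?_eq_getElem hk]
  simp only [Option.toList_some, List.sum_append, List.sum_cons, List.sum_nil, add_zero,
    List.getD_eq_getElem?_getD, List.getElem?_eq_getElem hk, Option.getD_some]

lemma seg_sum {line : List Int} {a : Nat} : ∀ {L : Nat}, a + L ≤ line.length →
    (line.take (a + L)).sum - (line.take a).sum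
      = ((List.range L).map (fun m => line.getD (a + m) 0)).sum := by
  intro L
  induction L with
  | zero => simp
  | succ L ih =>
    intro h
    have h1 : a + L < line.length := by omega
    have := sum_take_succ h1
    rw [show a + (L + 1) = (a + L) + 1 by omega, this, List.range_succ]
    rw [List.map_append, List.sum_append]
    have ih2 := ih (by omega)
    simp only [List.map_cons, List.map_nil, List.sum_cons, List.sum_nil]
    omega

-- candidate lists both programs maximise over
def LA (t : List (List Int)) : List Int :=
  (List.range t.length).flatMap (fun i =>
    (List.range t.length).flatMap (fun j =>
      (List.range' 1 9).map (Fc t t.length i j)))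

def candsOf (line : List Int) : List Int :=
  (List.range line.length).flatMap (fun a =>
    (List.range (min 9 (line.length - a))).map (fun L' =>
      (pvPrefixes line).getD (a + (L' + 1)) 0 - (pvPrefixes line).getD a 0))

def linesOf (t : List (List Int)) : List (List Int) :=
  (List.range t.length).map (fun i => (t.getD i []).take t.length)
    ++ (List.range t.length).map (fun j => (List.range t.length).map (fun i => pvEl t i j))

lemma foldl_congruence {α β : Type} : ∀ (l : List α) (f g : β → α → β) (s : β),
    (∀ a ∈ l, ∀ b, f b a = g b a) → l.foldl f s = l.foldl g s := by
  intro l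
  induction l with
  | nil => intro f g s _; rfl
  | cons x xs ih =>
    intro f g s h
    simp only [List.foldl_cons, h x (by simp)]
    exact ih f g _ (fun a ha b => h a (by simp [ha]) b)

lemma A_supL (t : List (List Int)) : podciag t = supL 0 (LA t) := by
  unfold podciag LA
  rw [← foldl_supL]
  apply foldl_congruence
  intro i hi s
  rw [← foldl_supL]
  apply foldl_congruence
  intro j hj s'
  have hi' := List.mem_range.mp hi
  have hj' := List.mem_range.mp hj
  have h := innerA_eq t t.length i j hi' hj' 9 1 s' (by omega)
  have e1 : min 1 (t.length - j) = 1 := by omega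
  have e2 : min 1 (t.length - i) = 1 := by omega
  rw [e1, e2] at h
  simpa [srow, scol] using h

lemma foldl_if_max (g : Nat → Int) : ∀ (l : List Nat) (s : Int),
    l.foldl (fun b x => if g x > b then g x else b) s = supL s (l.map g) := by
  intro l
  induction l with
  | nil => intro s; rfl
  | cons x xs ih =>
    intro s
    simp only [List.foldl_cons, List.map_cons, supL_cons]
    rw [show (if g x > s then g x else s) = max s (g x) by split_ifs <;> omega]
    exact ih _

lemma scan_supL (line : List Int) (best : Int) :
    pvScanLine line best = supL best (candsOf line) := by
  unfold pvScanLine candsOf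
  rw [← foldl_supL]
  apply foldl_congruence
  intro a _ b
  exact foldl_if_max _ _ _

lemma B_supL (t : List (List Int)) :
    podciag_alt t = supL 0 ((linesOf t).flatMap candsOf) := by
  unfold podciag_alt linesOf
  rw [← foldl_supL]
  apply foldl_congruence
  intro line _ b
  exact scan_supL line b

lemma getD_take_lt {l : List Int} {n p : Nat} (h : p < n) :
    (l.take n).getD p 0 = l.getD p 0 := by
  simp [List.getD_eq_getElem?_getD, h]

lemma cands_value {line : List Int} {a L : Nat} (ha : a < line.length) (h1 : 1 ≤ L)
    (hL : L ≤ min 9 (line.length - a)) :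
    ((List.range L).map (fun m => line.getD (a + m) 0)).sum ∈ candsOf line := by
  unfold candsOf
  rw [List.mem_flatMap]
  refine ⟨a, List.mem_range.mpr ha, ?_⟩
  rw [List.mem_map]
  refine ⟨L - 1, List.mem_range.mpr (by omega), ?_⟩
  rw [show L - 1 + 1 = L by omega]
  rw [prefixes_getD (by omega), prefixes_getD (by omega), seg_sum (by omega)]

lemma cands_mem_char {line : List Int} {x : Int} (hx : x ∈ candsOf line) :
    ∃ a L, a < line.length ∧ 1 ≤ L ∧ L ≤ min 9 (line.length - a) ∧
      x = ((List.range L).map (fun m => line.getD (a + m) 0)).sum := by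
  unfold candsOf at hx
  rw [List.mem_flatMap] at hx
  obtain ⟨a, ha, hx⟩ := hx
  rw [List.mem_map] at hx
  obtain ⟨L', hL', rfl⟩ := hx
  have ha := List.mem_range.mp ha
  have hL' := List.mem_range.mp hL'
  refine ⟨a, L' + 1, ha, by omega, by omega, ?_⟩
  rw [prefixes_getD (by omega), prefixes_getD (by omega), seg_sum (by omega)]

lemma rowline_len {t : List (List Int)} (hpre : Pre_podciag t) {i : Nat} (hi : i < t.length) :
    ((t.getD i []).take t.length).length = t.length := by
  have hrow : t.getD i [] ∈ t := by
    rw [List.getD_eq_getElem t [] hi]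
    exact List.getElem_mem hi
  have := hpre _ hrow
  rw [List.length_take]
  omega

lemma rowline_sum {t : List (List Int)} {i a L : Nat}
    (hla : a + L ≤ t.length) :
    ((List.range L).map (fun m => ((t.getD i []).take t.length).getD (a + m) 0)).sum
      = srow t i a L := by
  unfold srow
  congr 1
  apply List.map_congr_left
  intro m hm
  have hm := List.mem_range.mp hm
  exact getD_take_lt (by omega)

lemma colline_len {t : List (List Int)} {j : Nat} :
    ((List.range t.length).map (fun i => pvEl t i j)).length = t.length := by
  simp

lemma colline_getD {t : List (List Int)} {j p : Nat} (hp : p < t.length) :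
    ((List.range t.length).map (fun i => pvEl t i j)).getD p 0 = pvEl t p j := by
  simp [List.getD_eq_getElem?_getD, List.getElem?_map, List.getElem?_range hp]

lemma colline_sum {t : List (List Int)} {j a L : Nat}
    (hla : a + L ≤ t.length) :
    ((List.range L).map (fun m =>
        ((List.range t.length).map (fun i => pvEl t i j)).getD (a + m) 0)).sum
      = scol t a j L := by
  unfold scol
  congr 1
  apply List.map_congr_left
  intro m hm
  have hm := List.mem_range.mp hm
  exact colline_getD (by omega)

lemma row_le_sup {t : List (List Int)} (hpre : Pre_podciag t) {i a L : Nat}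
    (hi : i < t.length) (ha : a < t.length) (h1 : 1 ≤ L) (hL : L ≤ min 9 (t.length - a)) :
    srow t i a L ≤ supL 0 ((linesOf t).flatMap candsOf) := by
  apply mem_le_supL
  rw [List.mem_flatMap]
  refine ⟨(t.getD i []).take t.length, ?_, ?_⟩
  · unfold linesOf
    exact List.mem_append_left _ (List.mem_map.mpr ⟨i, List.mem_range.mpr hi, rfl⟩)
  · rw [← rowline_sum (t := t) (i := i) (by omega)]
    exact cands_value (by rw [rowline_len hpre hi]; omega) h1
      (by rw [rowline_len hpre hi]; omega)

lemma col_le_sup {t : List (List Int)} {j a L : Nat}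
    (hj : j < t.length) (ha : a < t.length) (h1 : 1 ≤ L) (hL : L ≤ min 9 (t.length - a)) :
    scol t a j L ≤ supL 0 ((linesOf t).flatMap candsOf) := by
  apply mem_le_supL
  rw [List.mem_flatMap]
  refine ⟨(List.range t.length).map (fun i => pvEl t i j), ?_, ?_⟩
  · unfold linesOf
    exact List.mem_append_right _ (List.mem_map.mpr ⟨j, List.mem_range.mpr hj, rfl⟩)
  · rw [← colline_sum (t := t) (j := j) (by omega)]
    exact cands_value (by rw [colline_len]; omega) h1 (by rw [colline_len]; omega)

lemma Fc_le_sup {t : List (List Int)} {i a k : Nat}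
    (hi : i < t.length) (ha : a < t.length) (h1 : 1 ≤ k) (hk : k ≤ 9) :
    Fc t t.length i a k ≤ supL 0 (LA t) := by
  apply mem_le_supL
  unfold LA
  rw [List.mem_flatMap]
  refine ⟨i, List.mem_range.mpr hi, ?_⟩
  rw [List.mem_flatMap]
  refine ⟨a, List.mem_range.mpr ha, ?_⟩
  exact List.mem_map.mpr ⟨k, List.mem_range'_1.mpr ⟨h1, by omega⟩, rfl⟩

-- ===== VERDICT (by name: the statement is the Claim_ definition above) =====
theorem podciag_spec : Claim_equal_podciag := by
  intro t _ hpre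
  unfold Spec_podciag
  rw [A_supL, B_supL]
  apply le_antisymm
  · apply supL_le (le_supL _ _)
    intro x hx
    unfold LA at hx
    rw [List.mem_flatMap] at hx
    obtain ⟨i, hi, hx⟩ := hx
    rw [List.mem_flatMap] at hx
    obtain ⟨j, hj, hx⟩ := hx
    rw [List.mem_map] at hx
    obtain ⟨k, hk, rfl⟩ := hx
    have hi := List.mem_range.mp hi
    have hj := List.mem_range.mp hj
    have hk := List.mem_range'_1.mp hk
    unfold Fc
    apply max_le
    · exact row_le_sup hpre hi hj (by omega) (by omega)
    · exact col_le_sup hj hi (by omega) (by omega)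
  · apply supL_le (le_supL _ _)
    intro x hx
    rw [List.mem_flatMap] at hx
    obtain ⟨line, hline, hx⟩ := hx
    obtain ⟨a, L, ha, h1, hL, rfl⟩ := cands_mem_char hx
    unfold linesOf at hline
    rcases List.mem_append.mp hline with hline | hline
    · obtain ⟨i, hi, rfl⟩ := List.mem_map.mp hline
      have hi := List.mem_range.mp hi
      have hlen := rowline_len hpre hi
      rw [hlen] at ha hL
      rw [rowline_sum (t := t) (i := i) (by omega)]
      calc srow t i a L ≤ Fc t t.length i a L := by
            unfold Fc
            rw [show min L (t.length - a) = L by omega]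
            exact le_max_left _ _
        _ ≤ supL 0 (LA t) := Fc_le_sup hi ha h1 (by omega)
    · obtain ⟨j, hj, rfl⟩ := List.mem_map.mp hline
      have hj := List.mem_range.mp hj
      rw [colline_len] at ha hL
      rw [colline_sum (t := t) (j := j) (by omega)]
      calc scol t a j L ≤ Fc t t.length a j L := by
            unfold Fc
            rw [show min L (t.length - a) = L by omega]
            exact le_max_right _ _
        _ ≤ supL 0 (LA t) := Fc_le_sup ha hj h1 (by omega)
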